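-- pv_equiv track=rewrite | github.com/teachamantofish/RAGMaster | AI_RAG/pipeline/common/unwrap_comments.py | unwrap_comments
-- ===== SOURCE A (Python) =====
-- def unwrap_comments(text):
--     """
--     Unwrap multi-line // comments by:
--     1. Finding comment blocks (consecutive lines starting with //)
--     2. Keeping the first line as-is
--     3. Removing the // and joining continuation lines to the first line
--     """
--     lines = text.split('\n')
--     result_lines = []
--     i = 0
--
--     while i < len(lines):
--         line = lines[i]
--
--         # Check if this line starts a comment block
--         if line.strip().startswith('//') and not line.strip().startswith('///'):
--             # This is the start of a comment block
--             comment_lines = [line]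
--             i += 1
--
--             # Collect all continuation comment lines
--             while i < len(lines):
--                 next_line = lines[i]
--                 if next_line.strip().startswith('//') and not next_line.strip().startswith('///'):
--                     comment_lines.append(next_line)
--                     i += 1
--                 else:
--                     break
--
--             # Process the comment block
--             if len(comment_lines) > 1:
--                 # Keep the first line as-is
--                 first_line = comment_lines[0]
--
--                 # Extract text content from continuation lines (remove // and leading whitespace)
--                 continuation_texts = []
--                 for comment_line in comment_lines[1:]:
--                     # Remove the // and any leading/trailing whitespace
--                     text_part = comment_line.strip()
--                     if text_part.startswith('//'):
--                         text_part = text_part[2:].strip()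
--                         if text_part:  # Only add non-empty text
--                             continuation_texts.append(text_part)
--
--                 # Combine first line with continuation text
--                 if continuation_texts:
--                     # Extract the text part from the first line (everything after //)
--                     first_text = first_line.strip()
--                     if first_text.startswith('//'):
--                         first_text = first_text[2:].strip()
--
--                     # Get the indentation from the first line
--                     first_line_indent = len(first_line) - len(first_line.lstrip())
--                     indent = ' ' * first_line_indent
--
--                     # Combine all text parts
--                     combined_text = first_text
--                     if combined_text and continuation_texts:
--                         combined_text += ' ' + ' '.join(continuation_texts)
--                     elif continuation_texts:
--                         combined_text = ' '.join(continuation_texts)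
--
--                     # Reconstruct the comment line
--                     result_lines.append(f"{indent}//{' ' + combined_text if combined_text else ''}")
--                 else:
--                     result_lines.append(first_line)
--             else:
--                 # Single line comment, keep as-is
--                 result_lines.append(comment_lines[0])
--         else:
--             # Not a comment line, keep as-is
--             result_lines.append(line)
--             i += 1
--
--     return '\n'.join(result_lines)
-- ===== SOURCE B (Python) =====
-- def _part(line):
--     """Text after the leading // of a stripped comment line."""
--     return line.strip()[2:].strip()
--
--
-- def _merge(parts, top):
--     """One merged comment line for a run whose first (topmost) line is `top`
--     and whose continuation texts (in order) are `parts`."""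
--     if not parts:
--         return top
--     ft = _part(top)
--     joined = ' '.join(parts)
--     combined = ft + ' ' + joined if ft else joined
--     indent = ' ' * (len(top) - len(top.lstrip()))
--     return indent + '// ' + combined
--
--
-- def unwrap_comments(text):
--     # Single pass over the lines in REVERSE order, building the output
--     # back-to-front.  `pending` carries the comment run that starts the
--     # already-processed suffix as (continuation texts, topmost line so far);
--     # a non-comment line above it flushes the run as one merged line.
--     pending = None
--     rout = []  # output lines, in reverse order
--     for line in reversed(text.split('\n')):
--         s = line.strip()
--         if s.startswith('//') and not s.startswith('///'):
--             if pending is None: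
--                 pending = ([], line)
--             else:
--                 parts, top = pending
--                 p = _part(top)
--                 pending = (([p] + parts) if p else parts, line)
--         else:
--             if pending is not None:
--                 rout.append(_merge(*pending))
--                 pending = None
--             rout.append(line)
--     if pending is not None:
--         rout.append(_merge(*pending))
--     return '\n'.join(reversed(rout))
-- ===== Notes on version B (the rewrite author's own statement) =====
-- stated objective: alternative
-- what changed: Replaces A's forward index walk with a nested block-collecting while by a single pass over the lines in reverse order that builds the output back-to-front, carrying the pending comment run as an accumulator (continuation texts, topmost line) and flushing it when a non-comment line above is reached.
import Mathlib
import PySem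

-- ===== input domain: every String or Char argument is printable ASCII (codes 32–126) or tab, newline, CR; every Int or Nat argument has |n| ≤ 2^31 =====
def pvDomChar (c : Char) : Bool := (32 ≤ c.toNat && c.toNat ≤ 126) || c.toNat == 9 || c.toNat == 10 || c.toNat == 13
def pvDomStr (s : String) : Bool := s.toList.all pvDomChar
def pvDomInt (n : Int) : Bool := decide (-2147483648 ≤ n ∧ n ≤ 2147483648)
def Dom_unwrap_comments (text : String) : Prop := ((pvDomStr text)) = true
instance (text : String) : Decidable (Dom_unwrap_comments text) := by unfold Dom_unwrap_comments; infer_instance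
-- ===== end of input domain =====

-- B replaces A's forward index walk with a nested block-collecting while by a single
-- reverse-order pass that builds the output back-to-front with a pending-run accumulator.

-- ===== PORT A =====

-- the repeated test `line.strip().startswith('//') and not line.strip().startswith('///')`
def isCmt (line : String) : Bool :=
  PySem.Str.startswith (PySem.Str.strip line) "//" &&
    !(PySem.Str.startswith (PySem.Str.strip line) "///")

-- body of A's `for comment_line in comment_lines[1:]` (appends at most one text part)
def contentA (cl : String) : Option String :=
  let t := PySem.Str.strip cl
  if PySem.Str.startswith t "//" then
    let p := PySem.Str.strip (PySem.Str.slice t (some 2) none)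
    if p ≠ "" then some p else none
  else none

-- `' ' * (len(first_line) - len(first_line.lstrip()))`
def indentA (first : String) : String :=
  String.ofList (List.replicate
    ((PySem.Str.len first).toNat - (PySem.Str.len (PySem.Str.lstrip first)).toNat) ' ')

-- A's "Process the comment block" part; comment_lines = first :: rest
def blockA (first : String) (rest : List String) : String :=
  if rest.length + 1 > 1 then
    let conts := rest.filterMap contentA
    if conts ≠ [] then
      let ft0 := PySem.Str.strip first
      let ft := if PySem.Str.startswith ft0 "//" then
                  PySem.Str.strip (PySem.Str.slice ft0 (some 2) none)
                else ft0
      let combined :=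
        if ft ≠ "" ∧ conts ≠ [] then ft ++ " " ++ PySem.Str.join " " conts
        else if conts ≠ [] then PySem.Str.join " " conts
        else ft
      indentA first ++ "//" ++ (if combined ≠ "" then " " ++ combined else "")
    else first
  else first

-- A's outer `while i < len(lines)`; the inner while collecting the block is the
-- takeWhile/dropWhile split of the remaining lines on the same test
def loopA : List String → List String
  | [] => []
  | l :: ls =>
    if isCmt l then
      blockA l (ls.takeWhile isCmt) :: loopA (ls.dropWhile isCmt)
    else
      l :: loopA ls
termination_by xs => xs.length
decreasing_by
  · exact Nat.lt_succ_of_le (List.length_dropWhile_le isCmt ls)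
  · simp

def unwrap_comments (text : String) : String :=
  PySem.Str.join "\n" (loopA ((PySem.Str.split? text "\n").getD []))

-- ===== PORT B =====

-- Source B's `_part`: `line.strip()[2:].strip()`
def partB (line : String) : String :=
  PySem.Str.strip (PySem.Str.slice (PySem.Str.strip line) (some 2) none)

-- Source B's `_merge(parts, top)`
def mergeB (parts : List String) (top : String) : String :=
  if parts = [] then top
  else
    let ft := partB top
    let joined := PySem.Str.join " " parts
    let combined := if ft = "" then joined else ft ++ " " ++ joined
    let indent := String.ofList (List.replicate
      ((PySem.Str.len top).toNat - (PySem.Str.len (PySem.Str.lstrip top)).toNat) ' ')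
    indent ++ "// " ++ combined

-- loop body of Source B's `for line in reversed(lines)`; state = (pending, rout).
-- Python appends to `rout` and reverses it at the end; here `rout` is cons-built,
-- so it is already in forward order and the final `reversed` is the identity.
def stepB (st : Option (List String × String) × List String) (line : String) :
    Option (List String × String) × List String :=
  let (pending, rout) := st
  if PySem.Str.startswith (PySem.Str.strip line) "//" &&
      !(PySem.Str.startswith (PySem.Str.strip line) "///") then
    match pending with
    | none => (some ([], line), rout)
    | some (parts, top) =>
      let p := partB top
      (some ((if p = "" then parts else p :: parts), line), rout)
  else
    match pending with
    | none => (none, line :: rout)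
    | some pr => (none, line :: mergeB pr.1 pr.2 :: rout)

def unwrap_comments_alt (text : String) : String :=
  let lines := (PySem.Str.split? text "\n").getD []
  let st := lines.reverse.foldl stepB (none, [])
  let rout := match st.1 with
    | none => st.2
    | some pr => mergeB pr.1 pr.2 :: st.2
  PySem.Str.join "\n" rout

-- ===== PRECONDITION & SPEC =====
def Spec_unwrap_comments (text : String) (out : String) : Prop := out = unwrap_comments_alt text
instance (text : String) (out : String) : Decidable (Spec_unwrap_comments text out) := by unfold Spec_unwrap_comments; infer_instance

-- ===== CLAIM (what is proved, stated in full; the proofs are below) =====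
def Claim_equal_unwrap_comments : Prop := ∀ (text : String), Dom_unwrap_comments text → Spec_unwrap_comments text (unwrap_comments text)

-- ===== LEMMAS AND PROOFS =====

def extractO (l : String) : Option String :=
  if partB l = "" then none else some (partB l)

def pendFor : List String → Option (List String × String)
  | [] => none
  | f :: r => some (r.filterMap extractO, f)

def flushB : Option (List String × String) → List String
  | none => []
  | some pr => [mergeB pr.1 pr.2]

theorem append_ne_empty_left (s t : String) (h : s ≠ "") : s ++ t ≠ "" := by
  intro he
  have h2 : s.length + t.length = 0 := by simpa using congrArg String.length he
  have h3 : s.length = 0 := by omega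
  rw [String.length_eq_zero_iff] at h3
  exact h h3

theorem join_sp_ne_empty (p : String) (ps : List String) (h : p ≠ "") :
    PySem.Str.join " " (p :: ps) ≠ "" := by
  intro he
  have h2 : (PySem.Str.join " " (p :: ps)).toList = [] := by rw [he]; rfl
  rw [PySem.Str.toList_join] at h2
  cases ps with
  | nil =>
    simp [PySem.Chars.join, List.intercalate] at h2
    exact h (by cases p; simp_all)
  | cons q qs =>
    simp [PySem.Chars.join, List.intercalate] at h2

theorem reassoc_comment (ind c : String) : ind ++ "//" ++ (" " ++ c) = ind ++ "// " ++ c := by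
  calc ind ++ "//" ++ (" " ++ c) = ind ++ ("//" ++ " ") ++ c := by
        rw [String.append_assoc, String.append_assoc, String.append_assoc]
    _ = ind ++ "// " ++ c := rfl

theorem startswith_of_isCmt {l : String} (h : isCmt l = true) :
    PySem.Str.startswith (PySem.Str.strip l) "//" = true := by
  simp only [isCmt, Bool.and_eq_true] at h
  exact h.1

theorem content_eq {l : String} (h : isCmt l = true) : contentA l = extractO l := by
  rw [contentA, extractO, startswith_of_isCmt h]
  by_cases hp : PySem.Str.strip (PySem.Str.slice (PySem.Str.strip l) (some 2) none) = "" <;>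
    simp [partB, hp]

theorem mem_parts_ne_empty {p : String} {rest : List String}
    (hp : p ∈ rest.filterMap extractO) : p ≠ "" := by
  rcases List.mem_filterMap.mp hp with ⟨x, _, hx⟩
  rw [extractO] at hx
  by_cases h2 : partB x = ""
  · rw [if_pos h2] at hx; exact absurd hx (by simp)
  · rw [if_neg h2] at hx
    rw [Option.some.injEq] at hx
    exact hx ▸ h2

theorem block_eq {first : String} {rest : List String}
    (h1 : isCmt first = true) (h2 : ∀ x ∈ rest, isCmt x = true) :
    blockA first rest = mergeB (rest.filterMap extractO) first := by
  cases rest with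
  | nil => simp [blockA, mergeB]
  | cons c cs =>
    have hfm : (c :: cs).filterMap contentA = (c :: cs).filterMap extractO :=
      List.filterMap_congr (fun x hx => content_eq (h2 x hx))
    have h1' := startswith_of_isCmt h1
    rw [blockA, mergeB, ← hfm]
    rcases hconts : (c :: cs).filterMap contentA with _ | ⟨p, ps⟩
    · simp only []
      simp
    · have hpne : p ≠ "" := mem_parts_ne_empty (by rw [← hfm] at *; exact hconts ▸ List.mem_cons_self)
      have hne : (p :: ps : List String) ≠ [] := by simp
      simp only []
      rw [if_pos (show (c :: cs).length + 1 > 1 by simp), if_pos h1',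
        if_neg (show ¬(p :: ps : List String) = [] by simp)]
      by_cases hft : PySem.Str.strip (PySem.Str.slice (PySem.Str.strip first) (some 2) none) = ""
      · rw [if_neg (show ¬(PySem.Str.strip (PySem.Str.slice (PySem.Str.strip first) (some 2) none) ≠ "" ∧
            (p :: ps : List String) ≠ []) by simp [hft]),
          if_pos hne]
        rw [if_pos hne]
        rw [if_pos (join_sp_ne_empty p ps hpne), reassoc_comment]
        show _ = _ ++ "// " ++ (if partB first = "" then _ else _)
        rw [show partB first = "" from hft]
        rfl
      · rw [if_pos (⟨hft, hne⟩ : _ ∧ _),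
          if_pos (append_ne_empty_left _ (PySem.Str.join " " (p :: ps))
            (append_ne_empty_left _ " " hft)),
          reassoc_comment]
        show _ = _ ++ "// " ++ (if partB first = "" then _ else _)
        rw [if_neg (show ¬ partB first = "" from hft)]
        rfl

theorem loop_split (ls : List String) :
    loopA ls = flushB (pendFor (ls.takeWhile isCmt)) ++ loopA (ls.dropWhile isCmt) := by
  cases ls with
  | nil => simp [loopA, pendFor, flushB]
  | cons m ms =>
    by_cases hm : isCmt m
    · rw [loopA, if_pos hm]
      rw [List.takeWhile_cons_of_pos hm, List.dropWhile_cons_of_pos hm, pendFor, flushB]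
      rw [block_eq hm (fun x hx => List.mem_takeWhile_imp hx)]
      rfl
    · rw [List.takeWhile_cons_of_neg hm, List.dropWhile_cons_of_neg hm, pendFor, flushB]
      simp

theorem foldr_char (xs : List String) :
    xs.foldr (fun x st => stepB st x) (none, []) =
      (pendFor (xs.takeWhile isCmt), loopA (xs.dropWhile isCmt)) := by
  induction xs with
  | nil => simp [pendFor, loopA]
  | cons l ls ih =>
    rw [List.foldr_cons, ih]
    by_cases hl : isCmt l
    · have hl' : (PySem.Str.startswith (PySem.Str.strip l) "//" &&
          !(PySem.Str.startswith (PySem.Str.strip l) "///")) = true := hl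
      rw [List.takeWhile_cons_of_pos hl, List.dropWhile_cons_of_pos hl]
      cases htw : ls.takeWhile isCmt with
      | nil =>
        simp only [stepB, hl', if_true]
        simp [pendFor]
      | cons f r =>
        simp only [stepB, hl', if_true, htw]
        simp only [pendFor, List.filterMap_cons, extractO]
        by_cases hp : partB f = "" <;> simp [hp]
    · have hl' : (PySem.Str.startswith (PySem.Str.strip l) "//" &&
          !(PySem.Str.startswith (PySem.Str.strip l) "///")) = false := by
        simpa [isCmt] using hl
      have hcons : loopA (l :: ls) = l :: loopA ls := by rw [loopA, if_neg hl]
      rw [List.takeWhile_cons_of_neg hl, List.dropWhile_cons_of_neg hl, hcons, loop_split ls]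
      cases htw : ls.takeWhile isCmt with
      | nil =>
        simp only [stepB, hl', Bool.false_eq_true, if_false, pendFor, flushB]
        simp
      | cons f r =>
        simp only [stepB, hl', Bool.false_eq_true, if_false, pendFor, flushB]
        simp

-- ===== VERDICT (by name: the statement is the Claim_ definition above) =====
theorem unwrap_comments_spec : Claim_equal_unwrap_comments := by
  intro text _
  show unwrap_comments text = unwrap_comments_alt text
  rw [unwrap_comments, unwrap_comments_alt]
  rw [List.foldl_reverse, foldr_char]
  rw [loop_split ((PySem.Str.split? text "\n").getD [])]
  cases htw : ((PySem.Str.split? text "\n").getD []).takeWhile isCmt <;>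
    simp [pendFor, flushB]
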